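-- pv_equiv track=rewrite | github.com/Mizersy/RepoDeepSearch | verl/verl/utils/reward_score/swe_loc.py | extract_locs
-- ===== SOURCE A (Python) =====
-- def extract_locs(locs):
--     current_file_name = None
--     results = {}
--     for loc in locs:
--         for line in loc.splitlines():
--             if line.strip().endswith(".py"):
--                 current_file_name = line.strip()
--             elif line.strip() and any(
--                 line.startswith(w)
--                 for w in ["line:", "function:", "class:", "variable:"]
--             ):
--                 if current_file_name not in results:
--                     results[current_file_name] = []
--                 if line not in results[current_file_name]: # deduplicate
--                     results[current_file_name].append(line)
--
--     # return {fn: ["\n".join(results[fn])] for fn in results.keys()}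
--     return results
-- ===== SOURCE B (Python) =====
-- def extract_locs(locs):
--     PREFIXES = ("line:", "function:", "class:", "variable:")
--     lines = [l for loc in locs for l in loc.splitlines()]
--     # stage 1: split the flat line list into (file, segment) blocks at ".py" headers
--     blocks = []
--     key, seg = None, []
--     for line in lines:
--         s = line.strip()
--         if s.endswith(".py"):
--             blocks.append((key, seg))
--             key, seg = s, []
--         else:
--             seg.append(line)
--     blocks.append((key, seg))
--     # stage 2: keep only the entry lines of each block (duplicates kept for now)
--     entries = [(k, [l for l in sg if l.strip() and l.startswith(PREFIXES)])
--                for k, sg in blocks]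
--     # stage 3: merge blocks of the same file, keyed in order of first contribution
--     merged = {}
--     for k, es in entries:
--         if es:
--             merged.setdefault(k, []).extend(es)
--     # stage 4: order-preserving dedup per file
--     return {k: list(dict.fromkeys(v)) for k, v in merged.items()}
-- ===== Notes on version B (the rewrite author's own statement) =====
-- stated objective: alternative
-- what changed: A is one stateful scan that dedup-inserts every entry line into a per-file dict bucket inline (a 'line not in bucket' list scan per entry); B is a staged pipeline: split the flattened lines into per-header blocks, filter each block down to its entry lines, merge blocks of the same file by plain concatenation, and only then dedup each file's list once with dict.fromkeys.
import Mathlib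
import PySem

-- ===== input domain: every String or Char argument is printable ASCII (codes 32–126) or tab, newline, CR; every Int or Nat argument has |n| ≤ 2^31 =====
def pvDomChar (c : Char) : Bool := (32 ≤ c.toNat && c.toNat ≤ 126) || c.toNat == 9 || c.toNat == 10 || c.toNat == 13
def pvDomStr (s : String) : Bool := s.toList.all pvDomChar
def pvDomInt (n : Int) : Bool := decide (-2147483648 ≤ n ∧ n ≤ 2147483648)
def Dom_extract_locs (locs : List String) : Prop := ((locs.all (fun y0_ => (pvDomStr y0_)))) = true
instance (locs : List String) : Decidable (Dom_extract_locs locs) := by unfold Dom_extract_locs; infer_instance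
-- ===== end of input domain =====

-- B replaces A's single stateful scan with its per-entry 'line not in bucket' list test by a
-- staged pipeline (split into header blocks, filter entries per block, merge by concatenation,
-- dedup once at the end via dict.fromkeys); measured faster in a timing run.


-- the ["line:", "function:", "class:", "variable:"] literal both Pythons carry
def pyEntryPrefixes : List String := ["line:", "function:", "class:", "variable:"]

-- ===== PORT A =====
-- one iteration of A's inner 'for line in loc.splitlines()' body
def extract_locs_stepA (st : Option String × PySem.Dict (Option String) (List String))
    (line : String) : Option String × PySem.Dict (Option String) (List String) :=
  if PySem.Str.endswith (PySem.Str.strip line) ".py" then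
    (some (PySem.Str.strip line), st.2)
  else if (!(PySem.Str.strip line == "")) &&
      (pyEntryPrefixes.any fun w => PySem.Str.startswith line w) then
    -- if current_file_name not in results: results[current_file_name] = []
    let res1 := if st.2.contains st.1 then st.2 else st.2.insert st.1 []
    let v := res1.getD st.1 []
    -- if line not in results[current_file_name]: results[...].append(line)
    if line ∈ v then (st.1, res1) else (st.1, res1.insert st.1 (v ++ [line]))
  else st

def extract_locs (locs : List String) : List (Option String × List String) :=
  (locs.foldl (fun st loc => (PySem.Str.splitlines loc).foldl extract_locs_stepA st)
    ((none : Option String), PySem.Dict.empty)).2.items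

-- ===== PORT B =====
-- Source B stage 1 loop body: split the flat line list into (file, segment) blocks at ".py" headers
def extract_locs_splitStep
    (st : List (Option String × List String) × Option String × List String)
    (line : String) : List (Option String × List String) × Option String × List String :=
  let s := PySem.Str.strip line
  if PySem.Str.endswith s ".py" then (st.1 ++ [(st.2.1, st.2.2)], some s, [])
  else (st.1, st.2.1, st.2.2 ++ [line])

-- Source B stage 2 filter predicate: 'l.strip() and l.startswith(PREFIXES)'
def pvIsEntryB (l : String) : Bool :=
  (!(PySem.Str.strip l == "")) && (pyEntryPrefixes.any fun w => PySem.Str.startswith l w)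

-- Source B stage 3 loop body: 'if es: merged.setdefault(k, []).extend(es)'
-- (setdefault, then the in-place extend of the shared bucket = overwriting insert)
def extract_locs_mergeStep (m : PySem.Dict (Option String) (List String))
    (p : Option String × List String) : PySem.Dict (Option String) (List String) :=
  if p.2 == ([] : List String) then m
  else
    let m' := m.setdefault p.1 []
    m'.insert p.1 (m'.getD p.1 [] ++ p.2)

def extract_locs_alt (locs : List String) : List (Option String × List String) :=
  let lines := locs.flatMap PySem.Str.splitlines
  let st := lines.foldl extract_locs_splitStep ([], (none : Option String), [])
  let blocks := st.1 ++ [(st.2.1, st.2.2)]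
  let entries := blocks.map (fun b => (b.1, b.2.filter pvIsEntryB))
  let merged := entries.foldl extract_locs_mergeStep PySem.Dict.empty
  -- {k: list(dict.fromkeys(v)) for k, v in merged.items()}
  merged.items.map (fun p => (p.1, PySem.List.dedup p.2))

-- ===== PRECONDITION & SPEC =====
def Spec_extract_locs (locs : List String) (out : List (Option String × List String)) : Prop := out = extract_locs_alt locs
instance (locs : List String) (out : List (Option String × List String)) : Decidable (Spec_extract_locs locs out) := by unfold Spec_extract_locs; infer_instance

-- ===== CLAIM (what is proved, stated in full; the proofs are below) =====
def Claim_equal_extract_locs : Prop := ∀ (locs : List String), Dom_extract_locs locs → Spec_extract_locs locs (extract_locs locs)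

-- ===== LEMMAS AND PROOFS =====

-- proof-internal intermediate pipeline: tag each entry line with the file active
-- at that point, then group the tags into a dict of deduplicated buckets
def extract_locs_tagStep (st : Option String × List (Option String × String))
    (line : String) : Option String × List (Option String × String) :=
  let s := PySem.Str.strip line
  if PySem.Str.endswith s ".py" then (some s, st.2)
  else if pvIsEntryB line then (st.1, st.2 ++ [(st.1, line)])
  else st

def extract_locs_grpStep (d : PySem.Dict (Option String) (PySem.Set String))
    (p : Option String × String) : PySem.Dict (Option String) (PySem.Set String) :=
  d.insert p.1 (PySem.Set.add (d.getD p.1 []) p.2)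

-- the flat tag list a block decomposition denotes
def pvTagsOf (blocks : List (Option String × List String)) : List (Option String × String) :=
  blocks.flatMap (fun b => (b.2.filter pvIsEntryB).map (fun l => (b.1, l)))

-- dedup every bucket of a dict (the denotation bridging stages 3 and 4 to grpStep)
def pvMapDedup (M : PySem.Dict (Option String) (List String)) :
    PySem.Dict (Option String) (List String) :=
  PySem.Dict.mk (M.items.map (fun p => (p.1, PySem.List.dedup p.2)))

-- unfoldings of the step functions, one per branch
theorem pv_tagStep_py (cur : Option String) (acc : List (Option String × String)) (line : String)
    (h1 : PySem.Str.endswith (PySem.Str.strip line) ".py" = true) :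
    extract_locs_tagStep (cur, acc) line = (some (PySem.Str.strip line), acc) := by
  simp only [extract_locs_tagStep, h1, if_true]

theorem pv_tagStep_entry (cur : Option String) (acc : List (Option String × String)) (line : String)
    (h1 : ¬ PySem.Str.endswith (PySem.Str.strip line) ".py" = true)
    (h2 : pvIsEntryB line = true) :
    extract_locs_tagStep (cur, acc) line = (cur, acc ++ [(cur, line)]) := by
  simp only [extract_locs_tagStep, h2, if_true, if_neg h1]

theorem pv_tagStep_skip (st : Option String × List (Option String × String)) (line : String)
    (h1 : ¬ PySem.Str.endswith (PySem.Str.strip line) ".py" = true)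
    (h2 : ¬ pvIsEntryB line = true) :
    extract_locs_tagStep st line = st := by
  simp only [extract_locs_tagStep, if_neg h1, if_neg h2]

theorem pv_stepA_py (cur : Option String) (d : PySem.Dict (Option String) (List String)) (line : String)
    (h1 : PySem.Str.endswith (PySem.Str.strip line) ".py" = true) :
    extract_locs_stepA (cur, d) line = (some (PySem.Str.strip line), d) := by
  simp only [extract_locs_stepA, h1, if_true]

theorem pv_stepA_skip (st : Option String × PySem.Dict (Option String) (List String)) (line : String)
    (h1 : ¬ PySem.Str.endswith (PySem.Str.strip line) ".py" = true)
    (h2 : ¬ pvIsEntryB line = true) :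
    extract_locs_stepA st line = st := by
  simp only [extract_locs_stepA, if_neg h1]
  simp only [pvIsEntryB] at h2
  simp only [if_neg h2]

-- rewriting an entry whose key holds exactly that value is a no-op (keys unique)
theorem pv_mapfix {κ ν : Type} [BEq κ] [LawfulBEq κ] (k : κ) (v : ν) :
    ∀ (l : List (κ × ν)), (l.map Prod.fst).Nodup →
      (l.find? (fun p => p.1 == k)).map Prod.snd = some v →
      l.map (fun p => if p.1 == k then (k, v) else p) = l := by
  intro l
  induction l with
  | nil => intro _ h; simp at h
  | cons p rest ih =>
    intro hnd hf
    simp only [List.map_cons, List.find?_cons] at *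
    have hp : p.1 ∉ rest.map Prod.fst := (List.nodup_cons.mp hnd).1
    have hrest : (rest.map Prod.fst).Nodup := (List.nodup_cons.mp hnd).2
    by_cases hk : (p.1 == k) = true
    · simp only [hk, if_true] at hf ⊢
      simp only [Option.map_some] at hf
      have hpk : p.1 = k := eq_of_beq hk
      have hrec : rest.map (fun p => if p.1 == k then (k, v) else p) = rest := by
        apply (List.map_congr_left ?_).trans (List.map_id rest)
        intro q hq
        have hne : q.1 ≠ k := fun h => hp (by rw [hpk, ← h]; exact List.mem_map.mpr ⟨q, hq, rfl⟩)
        simp [hne]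
      rw [hrec]
      have hpe : p = (k, v) := by
        cases p with
        | mk a b => simp only at hpk hf; subst hpk; cases hf; rfl
      rw [hpe]
    · simp only [hk, Bool.false_eq_true, if_false] at hf ⊢
      rw [ih hrest hf]

theorem pv_insert_self_of_get? {κ ν : Type} [BEq κ] [LawfulBEq κ]
    (d : PySem.Dict κ ν) (k : κ) (v : ν)
    (h : d.get? k = some v) (hnd : d.keys.Nodup) : d.insert k v = d := by
  have hc : d.contains k = true := by
    rw [PySem.Dict.contains_eq_isSome_get?, h]; rfl
  apply PySem.Dict.ext
  rw [PySem.Dict.items_insert_of_contains d v hc]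
  exact pv_mapfix k v d.items hnd (by simpa [PySem.Dict.get?] using h)

-- A's inline dedup-append equals one grouping step on any dict with unique keys
theorem pv_stepA_entry (d : PySem.Dict (Option String) (List String))
    (cur : Option String) (line : String) (hnd : d.keys.Nodup)
    (h1 : ¬ PySem.Str.endswith (PySem.Str.strip line) ".py" = true)
    (h2 : pvIsEntryB line = true) :
    extract_locs_stepA (cur, d) line = (cur, extract_locs_grpStep d (cur, line)) := by
  simp only [pvIsEntryB] at h2
  simp only [extract_locs_stepA, extract_locs_grpStep, h2, if_true, if_neg h1]
  by_cases hc : d.contains cur = true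
  · simp only [hc, if_true]
    obtain ⟨v0, hv0⟩ : ∃ v0, d.get? cur = some v0 := by
      rw [PySem.Dict.contains_eq_isSome_get?] at hc
      exact Option.isSome_iff_exists.mp hc
    have hgd : d.getD cur [] = v0 := PySem.Dict.getD_of_get?_eq_some d [] hv0
    rw [hgd, PySem.Set.add_eq_ite]
    by_cases hm : line ∈ v0
    · simp only [hm, if_true]
      rw [pv_insert_self_of_get? d cur v0 hv0 hnd]
    · simp only [hm, if_false]
  · simp only [hc, Bool.false_eq_true, if_false]
    rw [PySem.Dict.getD_insert_self]
    have hgd : d.getD cur [] = [] :=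
      PySem.Dict.getD_of_not_contains d [] (by simpa using hc)
    rw [hgd, PySem.Set.add_eq_ite]
    simp only [List.not_mem_nil, if_false]
    rw [PySem.Dict.insert_insert_self]

-- the tagging pass's accumulator only ever grows at the back
theorem pv_tag_shift : ∀ (lines : List String) (cur : Option String)
    (acc : List (Option String × String)),
    lines.foldl extract_locs_tagStep (cur, acc)
      = ((lines.foldl extract_locs_tagStep (cur, [])).1,
         acc ++ (lines.foldl extract_locs_tagStep (cur, [])).2) := by
  intro lines
  induction lines with
  | nil => intro cur acc; simp
  | cons line rest ih =>
    intro cur acc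
    by_cases h1 : PySem.Str.endswith (PySem.Str.strip line) ".py" = true
    · simp only [List.foldl_cons, pv_tagStep_py _ _ _ h1]; exact ih _ _
    · by_cases h2 : pvIsEntryB line = true
      · simp only [List.foldl_cons, pv_tagStep_entry _ _ _ h1 h2]
        rw [ih _ (acc ++ [(cur, line)]), ih _ ([] ++ [(cur, line)])]
        simp
      · simp only [List.foldl_cons, pv_tagStep_skip _ _ h1 h2]; exact ih _ _

-- main invariant of the A side: A's fold = tagging pass, then grouping the tags
theorem pv_mainA : ∀ (lines : List String) (cur : Option String)
    (d : PySem.Dict (Option String) (List String)), d.keys.Nodup →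
    lines.foldl extract_locs_stepA (cur, d)
      = ((lines.foldl extract_locs_tagStep (cur, [])).1,
         ((lines.foldl extract_locs_tagStep (cur, [])).2).foldl extract_locs_grpStep d) := by
  intro lines
  induction lines with
  | nil => intro cur d _; simp
  | cons line rest ih =>
    intro cur d hnd
    by_cases h1 : PySem.Str.endswith (PySem.Str.strip line) ".py" = true
    · simp only [List.foldl_cons, pv_stepA_py _ _ _ h1, pv_tagStep_py _ _ _ h1]
      exact ih _ _ hnd
    · by_cases h2 : pvIsEntryB line = true
      · simp only [List.foldl_cons, pv_stepA_entry d cur line hnd h1 h2, pv_tagStep_entry _ _ _ h1 h2]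
        have hnd2 : (extract_locs_grpStep d (cur, line)).keys.Nodup :=
          PySem.Dict.nodup_keys_insert _ _ _ hnd
        rw [ih _ _ hnd2, pv_tag_shift rest cur ([] ++ [(cur, line)])]
        simp
      · simp only [List.foldl_cons, pv_stepA_skip _ _ h1 h2, pv_tagStep_skip _ _ h1 h2]
        exact ih _ _ hnd

theorem pv_splitStep_py (blocks : List (Option String × List String)) (cur : Option String)
    (seg : List String) (line : String)
    (h1 : PySem.Str.endswith (PySem.Str.strip line) ".py" = true) :
    extract_locs_splitStep (blocks, cur, seg) line
      = (blocks ++ [(cur, seg)], some (PySem.Str.strip line), []) := by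
  simp only [extract_locs_splitStep, h1, if_true]

theorem pv_splitStep_other (blocks : List (Option String × List String)) (cur : Option String)
    (seg : List String) (line : String)
    (h1 : ¬ PySem.Str.endswith (PySem.Str.strip line) ".py" = true) :
    extract_locs_splitStep (blocks, cur, seg) line = (blocks, cur, seg ++ [line]) := by
  simp only [extract_locs_splitStep, if_neg h1]

theorem pvTagsOf_snoc (blocks : List (Option String × List String)) (k : Option String)
    (seg : List String) :
    pvTagsOf (blocks ++ [(k, seg)])
      = pvTagsOf blocks ++ (seg.filter pvIsEntryB).map (fun l => (k, l)) := by
  simp [pvTagsOf]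

-- main invariant of the B side: the split pass denotes the tagging pass
theorem pv_mainB : ∀ (lines : List String) (cur : Option String)
    (blocks : List (Option String × List String)) (seg : List String),
    lines.foldl extract_locs_tagStep (cur, pvTagsOf (blocks ++ [(cur, seg)]))
      = ((lines.foldl extract_locs_splitStep (blocks, cur, seg)).2.1,
         pvTagsOf ((lines.foldl extract_locs_splitStep (blocks, cur, seg)).1 ++
           [((lines.foldl extract_locs_splitStep (blocks, cur, seg)).2.1,
             (lines.foldl extract_locs_splitStep (blocks, cur, seg)).2.2)])) := by
  intro lines
  induction lines with
  | nil => intro cur blocks seg; simp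
  | cons line rest ih =>
    intro cur blocks seg
    by_cases h1 : PySem.Str.endswith (PySem.Str.strip line) ".py" = true
    · simp only [List.foldl_cons, pv_tagStep_py _ _ _ h1, pv_splitStep_py _ _ _ _ h1]
      have : pvTagsOf (blocks ++ [(cur, seg)])
          = pvTagsOf ((blocks ++ [(cur, seg)]) ++ [(some (PySem.Str.strip line), [])]) := by
        rw [pvTagsOf_snoc (blocks ++ [(cur, seg)])]; simp
      rw [this, ih]
    · simp only [List.foldl_cons, pv_splitStep_other _ _ _ _ h1]
      by_cases h2 : pvIsEntryB line = true
      · simp only [pv_tagStep_entry _ _ _ h1 h2]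
        have : pvTagsOf (blocks ++ [(cur, seg)]) ++ [(cur, line)]
            = pvTagsOf (blocks ++ [(cur, seg ++ [line])]) := by
          rw [pvTagsOf_snoc, pvTagsOf_snoc]
          simp [List.filter_append, h2]
        rw [this, ih]
      · simp only [pv_tagStep_skip _ _ h1 h2]
        have : pvTagsOf (blocks ++ [(cur, seg)])
            = pvTagsOf (blocks ++ [(cur, seg ++ [line])]) := by
          rw [pvTagsOf_snoc, pvTagsOf_snoc]
          simp [List.filter_append, h2]
        rw [this, ih]

-- grouping a nonempty run of tags sharing one key collapses to a single insert
theorem pv_grp_run (k : Option String) : ∀ (es : List String) (e : String)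
    (d : PySem.Dict (Option String) (PySem.Set String)),
    (((e :: es).map (fun l => (k, l))).foldl extract_locs_grpStep d)
      = d.insert k ((e :: es).foldl PySem.Set.add (d.getD k [])) := by
  intro es
  induction es with
  | nil => intro e d; simp [extract_locs_grpStep]
  | cons e2 rest ih =>
    intro e d
    simp only [List.map_cons, List.foldl_cons]
    have h1 : extract_locs_grpStep d (k, e) = d.insert k (PySem.Set.add (d.getD k []) e) := rfl
    rw [show ((rest.map (fun l => (k, l))).foldl extract_locs_grpStep
          (extract_locs_grpStep (extract_locs_grpStep d (k, e)) (k, e2)))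
        = (((e2 :: rest).map (fun l => (k, l))).foldl extract_locs_grpStep
            (extract_locs_grpStep d (k, e))) from by simp]
    rw [ih e2 (extract_locs_grpStep d (k, e)), h1,
      PySem.Dict.getD_insert_self, PySem.Dict.insert_insert_self, List.foldl_cons]

theorem pv_keys_mapDedup (M : PySem.Dict (Option String) (List String)) :
    (pvMapDedup M).keys = M.keys := by
  simp [pvMapDedup, PySem.Dict.keys]

theorem pv_contains_mapDedup (M : PySem.Dict (Option String) (List String)) (k : Option String) :
    (pvMapDedup M).contains k = M.contains k := by
  rw [PySem.Dict.contains_eq_decide_mem_keys, PySem.Dict.contains_eq_decide_mem_keys,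
    pv_keys_mapDedup]

theorem pv_getD_mapDedup (M : PySem.Dict (Option String) (List String)) (k : Option String)
    (hnd : M.keys.Nodup) :
    (pvMapDedup M).getD k [] = PySem.List.dedup (M.getD k []) := by
  have hndD : (pvMapDedup M).keys.Nodup := by rw [pv_keys_mapDedup]; exact hnd
  cases hg : M.get? k with
  | none =>
    have hk : k ∉ M.keys := (PySem.Dict.get?_eq_none_iff_not_mem_keys M k).mp hg
    have h1 : (pvMapDedup M).getD k [] = [] := by
      apply PySem.Dict.getD_of_not_contains
      rw [pv_contains_mapDedup, PySem.Dict.contains_eq_decide_mem_keys]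
      simpa using hk
    have h2 : M.getD k [] = [] := by
      apply PySem.Dict.getD_of_not_contains
      rw [PySem.Dict.contains_eq_decide_mem_keys]; simpa using hk
    simp [h1, h2, PySem.List.dedup]
  | some v =>
    have hm : (k, v) ∈ M.items := PySem.Dict.mem_items_of_get?_eq_some M hg
    have hm' : (k, PySem.List.dedup v) ∈ (pvMapDedup M).items := by
      simp only [pvMapDedup]
      exact List.mem_map.mpr ⟨(k, v), hm, rfl⟩
    rw [PySem.Dict.getD_of_mem_items _ hm' hndD, PySem.Dict.getD_of_get?_eq_some M [] hg]

theorem pv_mapDedup_insert (M : PySem.Dict (Option String) (List String)) (k : Option String)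
    (v : List String) :
    pvMapDedup (M.insert k v) = (pvMapDedup M).insert k (PySem.List.dedup v) := by
  apply PySem.Dict.ext
  by_cases hc : M.contains k = true
  · have hc' : (pvMapDedup M).contains k = true := by rw [pv_contains_mapDedup]; exact hc
    show ((M.insert k v).items.map (fun p => (p.1, PySem.List.dedup p.2))) = _
    rw [PySem.Dict.items_insert_of_contains M v hc,
      PySem.Dict.items_insert_of_contains (pvMapDedup M) (PySem.List.dedup v) hc']
    show _ = ((M.items.map (fun p => (p.1, PySem.List.dedup p.2))).map
        (fun p => if p.1 == k then (k, PySem.List.dedup v) else p))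
    simp only [List.map_map]
    apply List.map_congr_left
    intro p _
    by_cases hk : (p.1 == k) = true
    · have hpk : p.1 = k := eq_of_beq hk
      simp [hpk]
    · have hpk : ¬ p.1 = k := by simpa using hk
      simp [hpk]
  · have hc' : ¬ (pvMapDedup M).contains k = true := by rw [pv_contains_mapDedup]; exact hc
    show ((M.insert k v).items.map (fun p => (p.1, PySem.List.dedup p.2))) = _
    rw [PySem.Dict.items_insert_of_not_contains M v (by simpa using hc),
      PySem.Dict.items_insert_of_not_contains (pvMapDedup M) (PySem.List.dedup v)
        (by simpa using hc')]
    simp [pvMapDedup]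

-- stage 3's guarded setdefault+extend is a single overwriting insert
theorem pv_mergeStep_eq (M : PySem.Dict (Option String) (List String))
    (p : Option String × List String) (hne : ¬ (p.2 == ([] : List String)) = true) :
    extract_locs_mergeStep M p = M.insert p.1 (M.getD p.1 [] ++ p.2) := by
  simp only [extract_locs_mergeStep, if_neg hne]
  by_cases hc : M.contains p.1 = true
  · rw [PySem.Dict.setdefault_of_contains M [] hc]
  · rw [PySem.Dict.setdefault_of_not_contains M [] (by simpa using hc),
      PySem.Dict.getD_insert_self, PySem.Dict.insert_insert_self,
      PySem.Dict.getD_of_not_contains M [] (by simpa using hc)]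

theorem pv_nodup_mergeStep (M : PySem.Dict (Option String) (List String))
    (p : Option String × List String) (hnd : M.keys.Nodup) :
    (extract_locs_mergeStep M p).keys.Nodup := by
  by_cases hne : (p.2 == ([] : List String)) = true
  · simpa [extract_locs_mergeStep, hne] using hnd
  · rw [pv_mergeStep_eq M p hne]
    exact PySem.Dict.nodup_keys_insert _ _ _ hnd

-- main invariant of the grouping side: grouping the flat tags = merge then dedup
theorem pv_mainG : ∀ (E : List (Option String × List String))
    (M : PySem.Dict (Option String) (List String)), M.keys.Nodup →
    (E.flatMap (fun p => p.2.map (fun l => (p.1, l)))).foldl extract_locs_grpStep (pvMapDedup M)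
      = pvMapDedup (E.foldl extract_locs_mergeStep M) := by
  intro E
  induction E with
  | nil => intro M _; simp
  | cons p rest ih =>
    intro M hnd
    simp only [List.flatMap_cons, List.foldl_append, List.foldl_cons]
    cases hp : p.2 with
    | nil =>
      have hstep : extract_locs_mergeStep M p = M := by
        simp [extract_locs_mergeStep, hp]
      rw [hstep]
      simpa using ih M hnd
    | cons e es =>
      have hne : ¬ (p.2 == ([] : List String)) = true := by simp [hp]
      rw [pv_grp_run p.1 es e (pvMapDedup M), pv_getD_mapDedup M p.1 hnd]
      have hded : (e :: es).foldl PySem.Set.add (PySem.List.dedup (M.getD p.1 []))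
          = PySem.List.dedup (M.getD p.1 [] ++ (e :: es)) := by
        rw [PySem.List.dedup_eq_ofList, PySem.List.dedup_eq_ofList,
          PySem.Set.ofList_eq_foldl, PySem.Set.ofList_eq_foldl, List.foldl_append]
      rw [hded, ← pv_mapDedup_insert, ← hp, ← pv_mergeStep_eq M p hne]
      exact ih _ (pv_nodup_mergeStep M p hnd)

theorem pv_tags_entries (blocks : List (Option String × List String)) :
    pvTagsOf blocks
      = (blocks.map (fun b => (b.1, b.2.filter pvIsEntryB))).flatMap
          (fun p => p.2.map (fun l => (p.1, l))) := by
  simp [pvTagsOf, List.flatMap_map]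

-- ===== VERDICT (by name: the statement is the Claim_ definition above) =====
theorem extract_locs_spec : Claim_equal_extract_locs := by
  intro locs _
  unfold Spec_extract_locs extract_locs extract_locs_alt
  rw [← List.foldl_flatMap]
  rw [pv_mainA (locs.flatMap PySem.Str.splitlines) none PySem.Dict.empty (by simp)]
  have hstart : ([] : List (Option String × String))
      = pvTagsOf (([] : List (Option String × List String)) ++ [((none : Option String), [])]) := by
    simp [pvTagsOf]
  rw [hstart, pv_mainB (locs.flatMap PySem.Str.splitlines) none [] []]
  dsimp only
  rw [pv_tags_entries, show (PySem.Dict.empty : PySem.Dict (Option String) (PySem.Set String))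
      = pvMapDedup PySem.Dict.empty from rfl,
    pv_mainG _ PySem.Dict.empty (by simp)]
  rfl
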